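-- pv_equiv track=rewrite | github.com/zama-sarib/Autonomous-Tow-Truck-and-Trolley-Tracking | integration.py | isPersonLeft
-- ===== SOURCE A (Python) =====
-- def isPersonLeft(person,trolley_coords):
--     '''
--     This Function evaluates whether the person is on the left of the trolley
--     '''
--
--     x2_person = person[2]
--     boolean = True
--     for eachCoord in trolley_coords:
--         if x2_person < eachCoord[2]:
--             pass
--         else:
--             boolean = False
--     return boolean
-- ===== SOURCE B (Python) =====
-- def isPersonLeft(person, trolley_coords):
--     # Recursive short-circuit: the person is left of an empty fleet; otherwise
--     # they must be left of the first trolley and, recursively, of the rest.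
--     if not trolley_coords:
--         return True
--     return person[2] < trolley_coords[0][2] and isPersonLeft(person, trolley_coords[1:])
-- ===== Notes on version B (the rewrite author's own statement) =====
-- stated objective: alternative
-- what changed: Replaced A's iterative flag loop (which always scans the whole list and keeps a mutable boolean) with a structural recursion that short-circuits via 'and': it returns False at the first offending trolley without visiting the rest.
import Mathlib
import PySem

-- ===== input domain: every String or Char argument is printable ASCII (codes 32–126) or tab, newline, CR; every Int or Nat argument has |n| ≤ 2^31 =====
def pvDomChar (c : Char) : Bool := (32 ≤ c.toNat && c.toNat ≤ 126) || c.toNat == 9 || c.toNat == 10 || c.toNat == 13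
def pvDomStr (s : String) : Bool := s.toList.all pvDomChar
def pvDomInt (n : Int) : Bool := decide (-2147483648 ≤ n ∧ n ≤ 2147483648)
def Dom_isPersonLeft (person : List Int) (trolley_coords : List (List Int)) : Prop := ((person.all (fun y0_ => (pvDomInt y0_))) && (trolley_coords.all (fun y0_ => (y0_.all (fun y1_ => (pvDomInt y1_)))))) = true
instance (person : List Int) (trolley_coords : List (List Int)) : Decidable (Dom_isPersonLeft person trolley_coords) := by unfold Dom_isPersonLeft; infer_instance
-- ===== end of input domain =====

-- B replaces A's flag loop with a short-circuit structural recursion over the trolley list; same task, different decomposition (early exit instead of a mutable boolean).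


-- ===== PORT A =====
-- A: x2 = person[2]; flag loop, boolean set to False whenever x2 < coord[2] fails.
-- person[2]/coord[2] is pyGet?; Pre_ excludes the none (IndexError) cases, .getD 0 never the value used.
def isPersonLeft (person : List Int) (trolley_coords : List (List Int)) : Bool :=
  let x2_person := (PySem.List.pyGet? person 2).getD 0
  trolley_coords.foldl
    (fun boolean eachCoord =>
      if x2_person < (PySem.List.pyGet? eachCoord 2).getD 0 then boolean else false)
    true

-- ===== PORT B =====
-- B: recursion on trolley_coords with short-circuit 'and' (trolley_coords[1:] = the tail).
def isPersonLeft_alt (person : List Int) (trolley_coords : List (List Int)) : Bool :=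
  match trolley_coords with
  | [] => true
  | c :: rest =>
      decide ((PySem.List.pyGet? person 2).getD 0 < (PySem.List.pyGet? c 2).getD 0)
        && isPersonLeft_alt person rest

-- ===== PRECONDITION & SPEC =====
-- Pre_ excludes exactly the inputs where A raises IndexError: person shorter than 3,
-- or some trolley coordinate shorter than 3.
def Pre_isPersonLeft (person : List Int) (trolley_coords : List (List Int)) : Prop :=
  3 ≤ person.length ∧ ∀ c ∈ trolley_coords, 3 ≤ c.length
instance (person : List Int) (trolley_coords : List (List Int)) : Decidable (Pre_isPersonLeft person trolley_coords) := by unfold Pre_isPersonLeft; infer_instance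
def pvWitness_isPersonLeft : List Int × List (List Int) := ([0, 0, 1], [[5, 5, 2], [0, 0, 3]])

def Spec_isPersonLeft (person : List Int) (trolley_coords : List (List Int)) (out : Bool) : Prop := out = isPersonLeft_alt person trolley_coords
instance (person : List Int) (trolley_coords : List (List Int)) (out : Bool) : Decidable (Spec_isPersonLeft person trolley_coords out) := by unfold Spec_isPersonLeft; infer_instance

-- ===== CLAIM (what is proved, stated in full; the proofs are below) =====
def Claim_equal_isPersonLeft : Prop := ∀ (person : List Int) (trolley_coords : List (List Int)), Dom_isPersonLeft person trolley_coords → Pre_isPersonLeft person trolley_coords → Spec_isPersonLeft person trolley_coords (isPersonLeft person trolley_coords)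

-- ===== LEMMAS AND PROOFS =====

-- A's flag loop with accumulator b equals b && B's short-circuit recursion.
theorem foldl_flag_eq_alt (person : List Int) (l : List (List Int)) (b : Bool) :
    l.foldl
      (fun boolean eachCoord =>
        if (PySem.List.pyGet? person 2).getD 0 < (PySem.List.pyGet? eachCoord 2).getD 0
        then boolean else false) b
      = (b && isPersonLeft_alt person l) := by
  induction l generalizing b with
  | nil => simp [isPersonLeft_alt]
  | cons c t ih =>
    simp only [List.foldl_cons, isPersonLeft_alt, ih]
    by_cases h : (PySem.List.pyGet? person 2).getD 0 < (PySem.List.pyGet? c 2).getD 0 <;>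
      simp [h]

-- ===== VERDICT (by name: the statement is the Claim_ definition above) =====
theorem isPersonLeft_spec : Claim_equal_isPersonLeft := by
  intro person trolley_coords _ _
  show isPersonLeft person trolley_coords = isPersonLeft_alt person trolley_coords
  unfold isPersonLeft
  rw [foldl_flag_eq_alt, Bool.true_and]
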